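-- pv_equiv track=rewrite | github.com/gladwinyjh/Kattis | python/Trik.py | trik
-- ===== SOURCE A (Python) =====
-- def trik(n):
--
--     currPos = 1
--
--     for letter in str(n):
--         if (letter == "A"):
--             if (currPos == 1):
--                 currPos = 2
--
--             elif (currPos == 2):
--                 currPos = 1
--
--         if (letter == "B"):
--             if (currPos == 2):
--                 currPos = 3
--
--             elif (currPos == 3):
--                 currPos = 2
--
--         if (letter == "C"):
--             if (currPos == 1):
--                 currPos = 3
--
--             elif (currPos == 3):
--                 currPos = 1
--
--     return currPos
-- ===== SOURCE B (Python) =====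
-- def trik(n):
--     # Divide and conquer: each substring denotes a permutation of the three cups;
--     # compute half-permutations recursively and compose them, then apply to cup 1.
--     def perm(s):
--         if len(s) == 0:
--             return (1, 2, 3)
--         if len(s) == 1:
--             c = s[0]
--             if c == "A":
--                 return (2, 1, 3)
--             if c == "B":
--                 return (1, 3, 2)
--             if c == "C":
--                 return (3, 2, 1)
--             return (1, 2, 3)
--         mid = len(s) // 2
--         p = perm(s[:mid])
--         q = perm(s[mid:])
--         return (q[p[0] - 1], q[p[1] - 1], q[p[2] - 1])
--     return perm(str(n))[0]
-- ===== Notes on version B (the rewrite author's own statement) =====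
-- stated objective: alternative
-- what changed: B computes, by divide-and-conquer recursion on string halves, the full 3-cup permutation denoted by each substring and composes the two half-permutations, finally applying the composite to cup 1, instead of A's single left-to-right scan of a scalar position through nested if/elif branches.
import Mathlib
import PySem

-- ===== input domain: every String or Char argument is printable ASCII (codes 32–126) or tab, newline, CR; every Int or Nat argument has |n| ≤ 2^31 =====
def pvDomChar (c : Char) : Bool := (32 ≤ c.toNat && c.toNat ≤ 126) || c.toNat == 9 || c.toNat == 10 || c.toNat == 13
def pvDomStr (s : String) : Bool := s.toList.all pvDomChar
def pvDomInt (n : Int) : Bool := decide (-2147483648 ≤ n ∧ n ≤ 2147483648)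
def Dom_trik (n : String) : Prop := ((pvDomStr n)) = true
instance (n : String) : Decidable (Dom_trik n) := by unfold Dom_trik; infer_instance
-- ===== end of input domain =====

-- B computes the full 3-cup permutation of each string half by divide-and-conquer and
-- composes them, instead of A's left-to-right scan of a scalar position (alternative).

-- ===== PORT A =====
-- one letter of A's loop body: three successive (non-elif) ifs on the scalar position
def trikStepA (currPos : Int) (letter : Char) : Int :=
  let p1 :=
    if letter = 'A' then
      if currPos = 1 then 2 else if currPos = 2 then 1 else currPos
    else currPos
  let p2 :=
    if letter = 'B' then
      if p1 = 2 then 3 else if p1 = 3 then 2 else p1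
    else p1
  if letter = 'C' then
    if p2 = 1 then 3 else if p2 = 3 then 1 else p2
  else p2

def trik (n : String) : Int :=
  n.toList.foldl trikStepA 1

-- ===== PORT B =====
-- Python tuple indexing q[k] for k in {0,1,2}
def trikTupGet (q : Int × Int × Int) (k : Int) : Int :=
  if k = 0 then q.1 else if k = 1 then q.2.1 else q.2.2

-- perm(s): the permutation (image of cup 1, of cup 2, of cup 3) denoted by s
def trikPerm (l : List Char) : Int × Int × Int :=
  match l with
  | [] => (1, 2, 3)
  | [c] =>
    if c = 'A' then (2, 1, 3)
    else if c = 'B' then (1, 3, 2)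
    else if c = 'C' then (3, 2, 1)
    else (1, 2, 3)
  | c1 :: c2 :: rest =>
    let s := c1 :: c2 :: rest
    let mid := s.length / 2
    let p := trikPerm (s.take mid)
    let q := trikPerm (s.drop mid)
    (trikTupGet q (p.1 - 1), trikTupGet q (p.2.1 - 1), trikTupGet q (p.2.2 - 1))
termination_by l.length
decreasing_by
  · simp [List.length_take]; omega
  · simp; omega

def trik_alt (n : String) : Int :=
  (trikPerm n.toList).1

-- ===== PRECONDITION & SPEC =====
def Spec_trik (n : String) (out : Int) : Prop := out = trik_alt n
instance (n : String) (out : Int) : Decidable (Spec_trik n out) := by unfold Spec_trik; infer_instance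

-- ===== CLAIM (what is proved, stated in full; the proofs are below) =====
def Claim_equal_trik : Prop := ∀ (n : String), Dom_trik n → Spec_trik n (trik n)

-- ===== LEMMAS AND PROOFS =====

-- A's scan keeps the position in {1,2,3}
theorem trikStepA_range (p : Int) (c : Char) (hp : p = 1 ∨ p = 2 ∨ p = 3) :
    trikStepA p c = 1 ∨ trikStepA p c = 2 ∨ trikStepA p c = 3 := by
  rcases hp with rfl | rfl | rfl <;>
    by_cases hA : c = 'A' <;> by_cases hB : c = 'B' <;> by_cases hC : c = 'C' <;>
      simp [trikStepA, hA, hB, hC]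

theorem trik_foldl_range (l : List Char) (p : Int) (hp : p = 1 ∨ p = 2 ∨ p = 3) :
    l.foldl trikStepA p = 1 ∨ l.foldl trikStepA p = 2 ∨ l.foldl trikStepA p = 3 := by
  induction l generalizing p with
  | nil => exact hp
  | cons c t ih => exact ih _ (trikStepA_range p c hp)

-- a single letter's permutation agrees with A's step
theorem trikPerm_single (c : Char) :
    trikPerm [c] = (trikStepA 1 c, trikStepA 2 c, trikStepA 3 c) := by
  by_cases hA : c = 'A' <;> by_cases hB : c = 'B' <;> by_cases hC : c = 'C' <;>
    simp [trikPerm, trikStepA, hA, hB, hC]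

-- trikPerm l is exactly (A's scan from 1, from 2, from 3)
theorem trikPerm_eq (l : List Char) :
    trikPerm l = (l.foldl trikStepA 1, l.foldl trikStepA 2, l.foldl trikStepA 3) := by
  induction l using trikPerm.induct with
  | case1 => simp [trikPerm]
  | case2 => simpa using trikPerm_single 'A'
  | case3 _ => simpa using trikPerm_single 'B'
  | case4 _ _ => simpa using trikPerm_single 'C'
  | case5 c _ _ _ => simpa using trikPerm_single c
  | case6 c1 c2 rest s mid ih1 ih2 =>
    rw [trikPerm, ih1, ih2]
    have hsplit : ∀ p : Int, p = 1 ∨ p = 2 ∨ p = 3 →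
        trikTupGet ((c1 :: c2 :: rest).drop ((c1 :: c2 :: rest).length / 2) |>.foldl trikStepA 1,
                    (c1 :: c2 :: rest).drop ((c1 :: c2 :: rest).length / 2) |>.foldl trikStepA 2,
                    (c1 :: c2 :: rest).drop ((c1 :: c2 :: rest).length / 2) |>.foldl trikStepA 3)
            (p - 1)
          = ((c1 :: c2 :: rest).drop ((c1 :: c2 :: rest).length / 2)).foldl trikStepA p := by
      intro p hp
      rcases hp with rfl | rfl | rfl <;> simp [trikTupGet]
    have hcomp : ∀ p : Int, p = 1 ∨ p = 2 ∨ p = 3 →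
        ((c1 :: c2 :: rest).drop ((c1 :: c2 :: rest).length / 2)).foldl trikStepA
            (((c1 :: c2 :: rest).take ((c1 :: c2 :: rest).length / 2)).foldl trikStepA p)
          = (c1 :: c2 :: rest).foldl trikStepA p := by
      intro p _
      rw [← List.foldl_append, List.take_append_drop]
    refine Prod.ext ?_ (Prod.ext ?_ ?_) <;> simp only []
    · rw [hsplit _ (trik_foldl_range _ 1 (by simp)), hcomp 1 (by simp)]
    · rw [hsplit _ (trik_foldl_range _ 2 (by simp)), hcomp 2 (by simp)]
    · rw [hsplit _ (trik_foldl_range _ 3 (by simp)), hcomp 3 (by simp)]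

-- ===== VERDICT (by name: the statement is the Claim_ definition above) =====
theorem trik_spec : Claim_equal_trik := by
  intro n _
  show trik n = trik_alt n
  simp [trik, trik_alt, trikPerm_eq]
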